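-- pv_equiv track=rewrite | github.com/Revalus/Szyfrowanie | szyfrowanie/szyfrowanie.py | get_rotated_key
-- ===== SOURCE A (Python) =====
-- def rotate_key(key: list):
--     first_bit = key[0]
--     key = key[1:]
--     key.append(first_bit)
--     return key
--
-- def get_rotated_key(key: list, rotated_keys: list, rounds=8):
--     if rounds == 1:
--         rotated_keys.append(rotate_key(key))
--         return rotated_keys
--     if rounds % 2 == 0:
--         key_half_size = len(key) // 2
--         rotated_key_1 = rotate_key(key[0:key_half_size])
--         rotated_key_2 = rotate_key(key[key_half_size:])
--         rotated_key = rotated_key_1 + rotated_key_2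
--     else:
--         rotated_key = rotate_key(key)
--
--     rotated_keys.append(rotated_key)
--     return get_rotated_key(
--         rotated_key,
--         rotated_keys,
--         rounds - 1,
--     )
-- ===== SOURCE B (Python) =====
-- def rotate_key(key: list):
--     first_bit = key[0]
--     key = key[1:]
--     key.append(first_bit)
--     return key
--
-- def get_rotated_key(key: list, rotated_keys: list, rounds=8):
--     for r in range(rounds, 1, -1):
--         if r % 2 == 0:
--             h = len(key) // 2
--             key = rotate_key(key[:h]) + rotate_key(key[h:])
--         else:
--             key = rotate_key(key)
--         rotated_keys.append(key)
--     rotated_keys.append(rotate_key(key))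
--     return rotated_keys
-- ===== Notes on version B (the rewrite author's own statement) =====
-- stated objective: simpler
-- what changed: Replaces A's tail recursion with a single explicit for-loop over range(rounds, 1, -1) that updates the current key and appends each variant, then appends the final rotation.
import Mathlib
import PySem

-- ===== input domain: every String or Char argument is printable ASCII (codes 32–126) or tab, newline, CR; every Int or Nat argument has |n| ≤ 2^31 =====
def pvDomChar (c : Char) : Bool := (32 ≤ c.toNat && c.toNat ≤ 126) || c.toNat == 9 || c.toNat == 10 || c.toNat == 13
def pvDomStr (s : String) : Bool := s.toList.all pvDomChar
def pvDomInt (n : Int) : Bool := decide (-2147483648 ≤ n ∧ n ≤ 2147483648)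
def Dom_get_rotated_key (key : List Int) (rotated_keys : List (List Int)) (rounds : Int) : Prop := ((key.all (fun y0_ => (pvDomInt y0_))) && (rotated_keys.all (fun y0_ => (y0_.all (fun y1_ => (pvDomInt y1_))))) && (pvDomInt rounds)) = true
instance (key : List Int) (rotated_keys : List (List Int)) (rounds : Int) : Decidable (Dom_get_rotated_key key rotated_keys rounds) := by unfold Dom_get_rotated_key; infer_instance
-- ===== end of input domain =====

-- B replaces A's tail recursion with one explicit for-loop over range(rounds, 1, -1) (simpler; return value only — both append into the caller's rotated_keys list).

-- ===== PORT A =====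
-- rotate_key: exact for nonempty key (Python raises IndexError on [], excluded by Pre_)
def pvRotate (key : List Int) : List Int := key.drop 1 ++ key.take 1

def get_rotated_key (key : List Int) (rotated_keys : List (List Int)) (rounds : Int) : List (List Int) :=
  if rounds = 1 then rotated_keys ++ [pvRotate key]
  else if rounds < 1 then rotated_keys  -- totality guard: Python recurses forever here (outside Pre_)
  else
    let rotated_key :=
      if rounds % 2 = 0 then
        let key_half_size := key.length / 2
        pvRotate (key.take key_half_size) ++ pvRotate (key.drop key_half_size)
      else pvRotate key
    get_rotated_key rotated_key (rotated_keys ++ [rotated_key]) (rounds - 1)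
termination_by rounds.toNat
decreasing_by omega

-- ===== PORT B =====
def get_rotated_key_alt (key : List Int) (rotated_keys : List (List Int)) (rounds : Int) : List (List Int) :=
  let s := (PySem.List.pyRange rounds 1 (-1)).foldl
    (fun (st : List Int × List (List Int)) r =>
      let k :=
        if r % 2 = 0 then
          let h := st.1.length / 2
          pvRotate (st.1.take h) ++ pvRotate (st.1.drop h)
        else pvRotate st.1
      (k, st.2 ++ [k]))
    (key, rotated_keys)
  s.2 ++ [pvRotate s.1]

-- ===== PRECONDITION & SPEC =====
-- Pre_ excludes inputs where the Python A raises: rounds < 1 (unbounded recursion → RecursionError),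
-- rounds > 900 (recursion depth exceeds CPython's recursion limit → RecursionError; the bound is
-- slightly conservative to be safe under harness stack frames), and keys too short for rotate_key
-- (IndexError on an empty list, or an empty first half when rounds ≥ 2).
def Pre_get_rotated_key (key : List Int) (rotated_keys : List (List Int)) (rounds : Int) : Prop :=
  1 ≤ rounds ∧ rounds ≤ 900 ∧ ((rounds = 1 ∧ key ≠ []) ∨ 2 ≤ key.length)
instance (key : List Int) (rotated_keys : List (List Int)) (rounds : Int) : Decidable (Pre_get_rotated_key key rotated_keys rounds) := by unfold Pre_get_rotated_key; infer_instance

def pvWitness_get_rotated_key : List Int × List (List Int) × Int := ([1, 2, 3], [], 3)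

def Spec_get_rotated_key (key : List Int) (rotated_keys : List (List Int)) (rounds : Int) (out : List (List Int)) : Prop := out = get_rotated_key_alt key rotated_keys rounds
instance (key : List Int) (rotated_keys : List (List Int)) (rounds : Int) (out : List (List Int)) : Decidable (Spec_get_rotated_key key rotated_keys rounds out) := by unfold Spec_get_rotated_key; infer_instance

-- ===== CLAIM (what is proved, stated in full; the proofs are below) =====
def Claim_equal_get_rotated_key : Prop := ∀ (key : List Int) (rotated_keys : List (List Int)) (rounds : Int), Dom_get_rotated_key key rotated_keys rounds → Pre_get_rotated_key key rotated_keys rounds → Spec_get_rotated_key key rotated_keys rounds (get_rotated_key key rotated_keys rounds)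

-- ===== LEMMAS AND PROOFS =====

theorem get_rotated_key_eq_alt_aux : ∀ (n : Nat) (rounds : Int), (rounds - 1).toNat = n → 1 ≤ rounds →
    ∀ (key : List Int) (rk : List (List Int)),
      get_rotated_key key rk rounds = get_rotated_key_alt key rk rounds := by
  intro n
  induction n with
  | zero =>
    intro rounds hn h1 key rk
    have hr : rounds = 1 := by omega
    subst hr
    rw [get_rotated_key]
    simp [get_rotated_key_alt, PySem.List.pyRange_neg_one_eq_nil (le_refl (1 : Int))]
  | succ n ih =>
    intro rounds hn h1 key rk
    have h2 : (1 : Int) < rounds := by omega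
    rw [get_rotated_key]
    simp only [if_neg (by omega : ¬ rounds = 1), if_neg (by omega : ¬ rounds < 1)]
    rw [ih (rounds - 1) (by omega) (by omega)]
    -- both sides are now B's fold; peel one step off B's range on the right
    simp only [get_rotated_key_alt, PySem.List.pyRange_neg_one_cons h2, List.foldl_cons]

theorem get_rotated_key_spec : Claim_equal_get_rotated_key := by
  intro key rk rounds _ hpre
  exact get_rotated_key_eq_alt_aux (rounds - 1).toNat rounds rfl hpre.1 key rk
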